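-- pv_equiv track=rewrite | github.com/AlbertoBocchieri/CPU-Only-RAG-with-Adaptive-Context-Budgeting | scripts/legacy_acbsc/build_full_eval_assets.py | rebalance_targets
-- ===== SOURCE A (Python) =====
-- def rebalance_targets(targets: dict[str, int], available: dict[str, int], reference: dict[str, int], desired_total: int) -> dict[str, int]:
--     out = {label: min(int(targets.get(label, 0)), int(available.get(label, 0))) for label in available}
--     remaining = desired_total - sum(out.values())
--     while remaining > 0:
--         candidates = [
--             label
--             for label in sorted(available)
--             if out[label] < int(available[label])
--         ]
--         if not candidates:
--             break
--         candidates.sort(key=lambda label: (-(available[label] - out[label]), -reference.get(label, 0), label))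
--         out[candidates[0]] += 1
--         remaining -= 1
--     if sum(out.values()) != desired_total:
--         raise ValueError(f"Unable to allocate {desired_total} rows after capacity checks; got {sum(out.values())}")
--     return dict(sorted(out.items()))
-- ===== SOURCE B (Python) =====
-- def rebalance_targets(targets: dict[str, int], available: dict[str, int], reference: dict[str, int], desired_total: int) -> dict[str, int]:
--     # Water-filling: instead of granting one unit at a time to the label with the
--     # largest slack, compute the final level T directly (binary search on the
--     # amount of slack above a level), then hand the leftover r units to the r
--     # highest-priority labels at that level.
--     base = {label: min(int(targets.get(label, 0)), int(available.get(label, 0))) for label in available}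
--     slack = {label: int(available[label]) - base[label] for label in available}
--     need = desired_total - sum(base.values())
--     total_slack = sum(slack.values())
--     if need < 0 or need > total_slack:
--         got = sum(base.values()) + min(max(need, 0), total_slack)
--         raise ValueError(f"Unable to allocate {desired_total} rows after capacity checks; got {got}")
--     def above(level):
--         return sum(s - level for s in slack.values() if s > level)
--     lo, hi = 0, max(slack.values(), default=0)
--     while lo < hi:
--         mid = (lo + hi) // 2
--         if above(mid) <= need:
--             hi = mid
--         else:
--             lo = mid + 1
--     level = lo
--     extra = need - above(level)
--     out = {label: int(available[label]) - min(slack[label], level) for label in available}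
--     if extra:
--         eligible = sorted((l for l in available if slack[l] >= level), key=lambda l: (-reference.get(l, 0), l))
--         for l in eligible[:extra]:
--             out[l] += 1
--     return dict(sorted(out.items()))
-- ===== Notes on version B (the rewrite author's own statement) =====
-- stated objective: faster
-- what changed: A grants the desired units one at a time, re-filtering and re-sorting all labels on every iteration of the while-loop; B computes the final allocation directly by water-filling: it binary-searches the final slack level, sets every label's allocation from that level in one pass, and gives the few leftover units to the highest-priority labels at that level.
import Mathlib
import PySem

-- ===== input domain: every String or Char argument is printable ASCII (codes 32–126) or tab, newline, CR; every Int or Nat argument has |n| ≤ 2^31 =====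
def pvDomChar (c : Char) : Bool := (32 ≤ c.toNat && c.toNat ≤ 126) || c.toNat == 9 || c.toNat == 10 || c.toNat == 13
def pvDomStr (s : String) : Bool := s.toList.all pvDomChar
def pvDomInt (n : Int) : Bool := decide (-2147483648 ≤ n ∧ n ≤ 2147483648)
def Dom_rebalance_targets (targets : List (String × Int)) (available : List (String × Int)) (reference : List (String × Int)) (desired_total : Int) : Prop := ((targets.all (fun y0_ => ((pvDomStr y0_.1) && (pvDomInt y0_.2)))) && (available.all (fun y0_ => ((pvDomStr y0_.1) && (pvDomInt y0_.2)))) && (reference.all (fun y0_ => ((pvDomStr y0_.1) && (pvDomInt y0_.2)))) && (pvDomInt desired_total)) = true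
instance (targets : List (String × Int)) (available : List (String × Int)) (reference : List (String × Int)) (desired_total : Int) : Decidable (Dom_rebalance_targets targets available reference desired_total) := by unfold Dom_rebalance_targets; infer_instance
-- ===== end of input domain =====

-- B replaces A's one-unit-at-a-time greedy loop (re-sorting all labels each of the
-- `remaining` iterations) by a direct water-filling computation: binary-search the final
-- slack level, then hand the few leftover units to the highest-priority labels at that
-- level.  Objective: faster (O((n log n + n log maxslack)) instead of O(remaining · n log n)).

-- ===== PORT A =====
-- the while-loop; fuel = remaining.toNat (the loop runs at most `remaining` times,
-- decrementing `remaining` by exactly 1 each iteration).  Python's 3-tuple sort key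
-- (-(avail-out), -ref, label) compares lexicographically: ported exactly with
-- PySem.List.sorted2, splitting the tuple as (first, (second, third)).
def rtLoopA (aD rD : PySem.Dict String Int) : PySem.Dict String Int → Nat → PySem.Dict String Int
  | out, 0 => out
  | out, n+1 =>
    let candidates := (PySem.List.sorted aD.keys (fun l => l) false).filter
      (fun l => decide (out.getD l 0 < aD.getD l 0))
    match PySem.List.sorted2 candidates (fun l => -(aD.getD l 0 - out.getD l 0))
        (fun l => toLex (-(rD.getD l 0), l)) false with
    | [] => out
    | c :: _ => rtLoopA aD rD (out.modify c 0 (· + 1)) n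

def rebalance_targets (targets : List (String × Int)) (available : List (String × Int)) (reference : List (String × Int)) (desired_total : Int) : List (String × Int) :=
  let tD := PySem.Dict.ofList targets
  let aD := PySem.Dict.ofList available
  let rD := PySem.Dict.ofList reference
  let out0 := aD.keys.foldl (fun d l => d.insert l (min (tD.getD l 0) (aD.getD l 0))) PySem.Dict.empty
  let remaining := desired_total - out0.values.sum
  let out := rtLoopA aD rD out0 remaining.toNat
  -- Python finally raises ValueError unless the allocated total equals desired_total;
  -- those inputs are excluded by Pre_ (the value below is only claimed under Pre_)
  (PySem.Dict.ofList (PySem.List.sorted out.items (fun p => toLex p) false)).items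

-- ===== PORT B =====
-- Source B's `above(level)`: sum(s - level for s in slack.values() if s > level)
def rtAbove (slackVals : List Int) (level : Int) : Int :=
  ((slackVals.filter (fun s => decide (level < s))).map (fun s => s - level)).sum

-- Source B's binary-search while-loop (lo, hi with lo ≤ hi; terminates since hi - lo shrinks)
def rtBSearch (slackVals : List Int) (need lo hi : Int) : Int :=
  if h : lo < hi then
    if rtAbove slackVals (PySem.Int.floordiv (lo + hi) 2) ≤ need then
      rtBSearch slackVals need lo (PySem.Int.floordiv (lo + hi) 2)
    else
      rtBSearch slackVals need (PySem.Int.floordiv (lo + hi) 2 + 1) hi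
  else lo
termination_by (hi - lo).toNat
decreasing_by
  · have h1 := (PySem.Int.floordiv_lt_iff_lt_mul (a := lo + hi) (b := 2) (q := hi) (by norm_num)).mpr (by omega)
    have h2 := (PySem.Int.le_floordiv_iff_mul_le (a := lo + hi) (b := 2) (q := lo) (by norm_num)).mpr (by omega)
    omega
  · have h1 := (PySem.Int.floordiv_lt_iff_lt_mul (a := lo + hi) (b := 2) (q := hi) (by norm_num)).mpr (by omega)
    have h2 := (PySem.Int.le_floordiv_iff_mul_le (a := lo + hi) (b := 2) (q := lo) (by norm_num)).mpr (by omega)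
    omega

def rebalance_targets_alt (targets : List (String × Int)) (available : List (String × Int)) (reference : List (String × Int)) (desired_total : Int) : List (String × Int) :=
  let tD := PySem.Dict.ofList targets
  let aD := PySem.Dict.ofList available
  let rD := PySem.Dict.ofList reference
  let base := aD.keys.foldl (fun d l => d.insert l (min (tD.getD l 0) (aD.getD l 0))) PySem.Dict.empty
  let slack := aD.keys.foldl (fun d l => d.insert l (aD.getD l 0 - base.getD l 0)) PySem.Dict.empty
  let need := desired_total - base.values.sum
  -- Source B raises ValueError here when need < 0 or total slack < need — excluded by Pre_
  let hi := PySem.List.maxD slack.values (fun s => s) 0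
  let level := rtBSearch slack.values need 0 hi
  let extra := need - rtAbove slack.values level
  let out := aD.keys.foldl (fun d l => d.insert l (aD.getD l 0 - min (slack.getD l 0) level)) PySem.Dict.empty
  let out2 :=
    if extra = 0 then out
    else
      (PySem.List.slice
        (PySem.List.sorted (aD.keys.filter (fun l => decide (level ≤ slack.getD l 0)))
          (fun l => toLex (-(rD.getD l 0), l)) false)
        none (some extra)).foldl (fun d l => d.modify l 0 (· + 1)) out
  (PySem.Dict.ofList (PySem.List.sorted out2.items (fun p => toLex p) false)).items

-- ===== PRECONDITION & SPEC =====
-- Pre_ excludes exactly the inputs on which A raises ValueError: the allocation is feasible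
-- iff  Σ_label min(targets[label], available[label])  ≤  desired_total  ≤  Σ_label available[label].
def Pre_rebalance_targets (targets : List (String × Int)) (available : List (String × Int)) (reference : List (String × Int)) (desired_total : Int) : Prop :=
  ((PySem.Dict.ofList available).items.map
      (fun p => min ((PySem.Dict.ofList targets).getD p.1 0) p.2)).sum ≤ desired_total ∧
  desired_total ≤ ((PySem.Dict.ofList available).items.map (fun p => p.2)).sum
instance (targets : List (String × Int)) (available : List (String × Int)) (reference : List (String × Int)) (desired_total : Int) : Decidable (Pre_rebalance_targets targets available reference desired_total) := by unfold Pre_rebalance_targets; infer_instance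

def pvWitness_rebalance_targets : (List (String × Int)) × (List (String × Int)) × (List (String × Int)) × Int :=
  ([("a", 2)], [("a", 3), ("b", 1)], [("b", 5)], 3)

def Spec_rebalance_targets (targets : List (String × Int)) (available : List (String × Int)) (reference : List (String × Int)) (desired_total : Int) (out : List (String × Int)) : Prop := out = rebalance_targets_alt targets available reference desired_total
instance (targets : List (String × Int)) (available : List (String × Int)) (reference : List (String × Int)) (desired_total : Int) (out : List (String × Int)) : Decidable (Spec_rebalance_targets targets available reference desired_total out) := by unfold Spec_rebalance_targets; infer_instance

-- ===== CLAIM (what is proved, stated in full; the proofs are below) =====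
def Claim_equal_rebalance_targets : Prop := ∀ (targets : List (String × Int)) (available : List (String × Int)) (reference : List (String × Int)) (desired_total : Int), Dom_rebalance_targets targets available reference desired_total → Pre_rebalance_targets targets available reference desired_total → Spec_rebalance_targets targets available reference desired_total (rebalance_targets targets available reference desired_total)

-- ===== LEMMAS AND PROOFS =====

-- abstract water level machinery: labs = the labels, rf = reference, s = initial slack,
-- v = current slack

def wfPrio (rf : String → Int) (l : String) : Lex (Int × String) := toLex (-(rf l), l)

def wfKey (v rf : String → Int) (l : String) : Lex (Int × Lex (Int × String)) :=
  toLex (-(v l), wfPrio rf l)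

def wfCand (labs : List String) (v : String → Int) : List String :=
  (PySem.List.sorted labs (fun l => l) false).filter (fun l => decide (0 < v l))

def wfChoose (labs : List String) (rf v : String → Int) : Option String :=
  (PySem.List.sorted (wfCand labs v) (wfKey v rf) false).head?

def wfStep (labs : List String) (rf : String → Int) (v : String → Int) : String → Int :=
  match wfChoose labs rf v with
  | none => v
  | some m => fun l => if l = m then v l - 1 else v l

def wfIter (labs : List String) (rf s : String → Int) : Nat → (String → Int)
  | 0 => s
  | n+1 => wfStep labs rf (wfIter labs rf s n)

def wfAbove (labs : List String) (s : String → Int) (t : Int) : Int :=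
  (labs.map (fun l => max (s l - t) 0)).sum

def wfElig (labs : List String) (rf s : String → Int) (t : Int) : List String :=
  PySem.List.sorted (labs.filter (fun l => decide (t ≤ s l))) (wfPrio rf) false

def wfVAt (labs : List String) (rf s : String → Int) (t : Int) (k : Nat) (l : String) : Int :=
  min (s l) t - (if l ∈ (wfElig labs rf s t).take k then 1 else 0)

def wfCanon (labs : List String) (s : String → Int) (R t : Int) : Prop :=
  0 ≤ t ∧ wfAbove labs s t ≤ R ∧ (t = 0 ∨ R < wfAbove labs s (t-1))

theorem wfAbove_nonneg (labs : List String) (s : String → Int) (t : Int) :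
    0 ≤ wfAbove labs s t := by
  apply List.sum_nonneg
  intro x hx
  obtain ⟨l, -, rfl⟩ := List.mem_map.mp hx
  exact le_max_right _ _

theorem wfAbove_antitone (labs : List String) (s : String → Int) {t t' : Int} (h : t ≤ t') :
    wfAbove labs s t' ≤ wfAbove labs s t := by
  apply List.sum_le_sum
  intro l _
  exact max_le_max (by omega) le_rfl

theorem wfAbove_pred (labs : List String) (s : String → Int) (t : Int) :
    wfAbove labs s (t-1) = wfAbove labs s t + (labs.countP (fun l => decide (t ≤ s l)) : Int) := by
  induction labs with
  | nil => simp [wfAbove]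
  | cons l ls ih =>
    simp only [wfAbove, List.map_cons, List.sum_cons, List.countP_cons] at *
    by_cases hle : t ≤ s l
    · rw [max_eq_left (by omega), max_eq_left (by omega)]
      simp only [hle, decide_true]
      push_cast
      omega
    · rw [max_eq_right (by omega), max_eq_right (by omega)]
      simp only [hle, decide_false]
      push_cast
      omega

theorem wfAbove_le_zero (labs : List String) (s : String → Int) (t : Int)
    (h : wfAbove labs s t ≤ 0) : ∀ l ∈ labs, s l ≤ t := by
  induction labs with
  | nil => simp
  | cons l ls ih =>
    simp only [wfAbove, List.map_cons, List.sum_cons] at h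
    have h1 : 0 ≤ wfAbove ls s t := wfAbove_nonneg ls s t
    simp only [wfAbove] at h1
    have h2 : max (s l - t) 0 ≤ 0 := by omega
    intro x hx
    rcases List.mem_cons.mp hx with rfl | hx'
    · have := le_max_left (s x - t) 0; omega
    · exact ih (by simp only [wfAbove]; omega) x hx'

theorem wfCanon_exists (labs : List String) (s : String → Int) (R : Int) (hR : 0 ≤ R) :
    ∃ t, wfCanon labs s R t := by
  have hM : ∀ l ∈ labs, s l ≤ (((labs.map fun l => (s l).toNat).foldr max 0 : Nat) : Int) := by
    induction labs with
    | nil => simp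
    | cons a ls ih =>
      intro l hl
      rcases List.mem_cons.mp hl with rfl | hl'
      · simp only [List.map_cons, List.foldr_cons]
        have := Nat.le_max_left ((s l).toNat) ((ls.map fun l => (s l).toNat).foldr max 0)
        omega
      · have := ih l hl'
        simp only [List.map_cons, List.foldr_cons]
        have h2 := Nat.le_max_right ((s l).toNat) ((ls.map fun l => (s l).toNat).foldr max 0)
        omega
  have hPM : wfAbove labs s (((labs.map fun l => (s l).toNat).foldr max 0 : Nat) : Int) ≤ R := by
    have : wfAbove labs s (((labs.map fun l => (s l).toNat).foldr max 0 : Nat) : Int) = 0 := by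
      apply List.sum_eq_zero
      intro x hx
      obtain ⟨l, hl, rfl⟩ := List.mem_map.mp hx
      have := hM l hl
      exact max_eq_right (by omega)
    omega
  have hex : ∃ u : Nat, wfAbove labs s (u : Int) ≤ R := ⟨_, hPM⟩
  classical
  let t0 := Nat.find hex
  refine ⟨(t0 : Int), by positivity, Nat.find_spec hex, ?_⟩
  rcases Nat.eq_zero_or_pos t0 with h0 | hpos
  · left; simp [h0]
  · right
    have hmin := Nat.find_min hex (m := t0 - 1) (by omega)
    have hcast : ((t0 : Int) - 1) = ((t0 - 1 : Nat) : Int) := by omega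
    rw [hcast]
    omega

theorem wfCanon_unique (labs : List String) (s : String → Int) (R t t' : Int)
    (h : wfCanon labs s R t) (h' : wfCanon labs s R t') : t = t' := by
  obtain ⟨h0, h1, h2⟩ := h
  obtain ⟨h0', h1', h2'⟩ := h'
  by_contra hne
  rcases lt_or_gt_of_ne hne with hlt | hgt
  · have ht' : t' ≠ 0 := by omega
    have := wfAbove_antitone labs s (t := t) (t' := t' - 1) (by omega)
    rcases h2' with h | h
    · exact ht' h
    · omega
  · have ht : t ≠ 0 := by omega
    have := wfAbove_antitone labs s (t := t') (t' := t - 1) (by omega)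
    rcases h2 with h | h
    · exact ht h
    · omega

theorem wfElig_length (labs : List String) (rf s : String → Int) (t : Int) :
    ((wfElig labs rf s t).length : Int) = wfAbove labs s (t-1) - wfAbove labs s t := by
  rw [wfAbove_pred labs s t]
  simp [wfElig, PySem.List.length_sorted, ← List.countP_eq_length_filter]

theorem wfElig_nodup (labs : List String) (rf s : String → Int) (t : Int) (hn : labs.Nodup) :
    (wfElig labs rf s t).Nodup := by
  exact (PySem.List.sorted_perm _ _ _).nodup_iff.mpr (hn.filter _)

theorem mem_wfElig (labs : List String) (rf s : String → Int) (t : Int) (l : String) :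
    l ∈ wfElig labs rf s t ↔ l ∈ labs ∧ t ≤ s l := by
  rw [wfElig, PySem.List.mem_sorted, List.mem_filter]
  simp

theorem wfElig_pairwise (labs : List String) (rf s : String → Int) (t : Int) :
    (wfElig labs rf s t).Pairwise (fun a b => wfPrio rf a ≤ wfPrio rf b) := by
  exact PySem.List.sorted_pairwise _ _

theorem wfPrio_inj (rf : String → Int) {a b : String} (h : wfPrio rf a = wfPrio rf b) : a = b := by
  have := toLex.injective h
  exact (Prod.mk.injEq _ _ _ _).mp this |>.2

theorem wfKey_inj (v rf : String → Int) {a b : String} (h : wfKey v rf a = wfKey v rf b) : a = b := by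
  have h1 := toLex.injective h
  have h2 := (Prod.mk.injEq _ _ _ _).mp h1 |>.2
  exact wfPrio_inj rf h2

theorem mem_wfCand (labs : List String) (v : String → Int) (l : String) :
    l ∈ wfCand labs v ↔ l ∈ labs ∧ 0 < v l := by
  rw [wfCand, List.mem_filter, PySem.List.mem_sorted]
  simp

theorem wfChoose_eq_some (labs : List String) (rf v : String → Int) {w : String}
    (hw : w ∈ wfCand labs v)
    (hmin : ∀ y ∈ wfCand labs v, wfKey v rf w ≤ wfKey v rf y) :
    wfChoose labs rf v = some w := by
  rw [wfChoose]
  rcases hsort : PySem.List.sorted (wfCand labs v) (wfKey v rf) false with _ | ⟨m, tl⟩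
  · rw [PySem.List.sorted_eq_nil_iff] at hsort
    rw [hsort] at hw
    simp at hw
  · have hm : m ∈ wfCand labs v := by
      rw [← PySem.List.mem_sorted (wfCand labs v) (wfKey v rf) false m, hsort]
      exact List.mem_cons_self
    have h1 := PySem.List.key_head_sorted_le (wfCand labs v) (wfKey v rf) hsort w hw
    have h2 := hmin m hm
    have : w = m := wfKey_inj v rf (le_antisymm h2 h1)
    simp [this]

theorem wfStep_none (labs : List String) (rf v : String → Int)
    (h : wfChoose labs rf v = none) : ∀ n, wfIter labs rf v n = v := by
  intro n
  induction n with
  | zero => rfl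
  | succ n ih =>
    show wfStep labs rf (wfIter labs rf v n) = v
    rw [ih, wfStep, h]

theorem wfIter_shift (labs : List String) (rf s : String → Int) (n : Nat) :
    wfIter labs rf (wfStep labs rf s) n = wfIter labs rf s (n+1) := by
  induction n with
  | zero => rfl
  | succ n ih =>
    show wfStep labs rf (wfIter labs rf (wfStep labs rf s) n) = wfIter labs rf s (n+2)
    rw [ih]
    rfl

-- the main water-filling theorem: n unit steps of the greedy loop reach the closed form
theorem wfIter_eq_vAt (labs : List String) (rf s : String → Int)
    (hn : labs.Nodup) (hs : ∀ l ∈ labs, 0 ≤ s l) :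
    ∀ (n : Nat) (t : Int), wfCanon labs s (n : Int) t → (n : Int) ≤ wfAbove labs s 0 →
    ∀ l ∈ labs, wfIter labs rf s n l = wfVAt labs rf s t (((n : Int) - wfAbove labs s t).toNat) l := by
  intro n
  induction n with
  | zero =>
    intro t ht _ l hl
    obtain ⟨h0, h1, _⟩ := ht
    have hz : wfAbove labs s t = 0 :=
      le_antisymm (by exact_mod_cast h1) (wfAbove_nonneg labs s t)
    have hst : s l ≤ t := wfAbove_le_zero labs s t (le_of_eq hz) l hl
    simp [wfIter, wfVAt, hz, min_eq_left hst]
  | succ n ih =>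
    intro t ht hle l hl
    have hle' : (n : Int) ≤ wfAbove labs s 0 := by push_cast at hle ⊢; omega
    obtain ⟨u, hu⟩ := wfCanon_exists labs s (n : Int) (by positivity)
    obtain ⟨hu0, hu1, hu2⟩ := hu
    set kn : Nat := (((n : Int)) - wfAbove labs s u).toNat with hkn_def
    have hIH : ∀ x ∈ labs, wfIter labs rf s n x = wfVAt labs rf s u kn x :=
      fun x hx => ih u ⟨hu0, hu1, hu2⟩ hle' x hx
    have hu1' : 1 ≤ u := by
      by_contra hcon
      have : u = 0 := by omega
      subst this
      push_cast at hle
      omega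
    have hcnt := wfElig_length labs rf s u
    have hkn : (kn : Int) = (n : Int) - wfAbove labs s u := Int.toNat_of_nonneg (by omega)
    have hnlt : (n : Int) < wfAbove labs s (u - 1) := by
      rcases hu2 with h | h
      · omega
      · exact h
    set E := wfElig labs rf s u with hE_def
    have hklt : kn < E.length := by omega
    set w : String := E[kn] with hw_def
    set v' : String → Int := wfIter labs rf s n with hv'_def
    have hEnodup : E.Nodup := wfElig_nodup labs rf s u hn
    have hwE : w ∈ E := List.getElem_mem hklt
    have hwlabs : w ∈ labs := ((mem_wfElig labs rf s u w).mp hwE).1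
    have hws : u ≤ s w := ((mem_wfElig labs rf s u w).mp hwE).2
    have hwnottake : w ∉ E.take kn := by
      intro hmem
      obtain ⟨j, hj, hje⟩ := List.mem_take_iff_getElem.mp hmem
      have hj' : j < E.length := lt_of_lt_of_le hj (min_le_right _ _)
      have : j = kn := (hEnodup.getElem_inj_iff (hi := hj') (hj := hklt)).mp hje
      omega
    have hvAtw : wfVAt labs rf s u kn w = u := by
      rw [wfVAt, if_neg hwnottake, min_eq_right hws]
      ring
    have hvw : v' w = u := by rw [hIH w hwlabs, hvAtw]
    have hvAt_le : ∀ x, wfVAt labs rf s u kn x ≤ min (s x) u := by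
      intro x
      rw [wfVAt]
      split_ifs <;> omega
    have hvAt_eq_u : ∀ x ∈ labs, wfVAt labs rf s u kn x = u → x ∈ E ∧ x ∉ E.take kn := by
      intro x hx hxu
      rw [wfVAt] at hxu
      by_cases hmem : x ∈ E.take kn
      · rw [if_pos hmem] at hxu
        have := min_le_right (s x) u
        omega
      · rw [if_neg hmem] at hxu
        have hxE : x ∈ E := by
          rw [mem_wfElig]
          refine ⟨hx, ?_⟩
          have := min_le_left (s x) u
          by_contra hcon
          rw [min_eq_left (by omega)] at hxu
          omega
        exact ⟨hxE, hmem⟩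
    have hchoose : wfChoose labs rf v' = some w := by
      apply wfChoose_eq_some
      · rw [mem_wfCand]
        exact ⟨hwlabs, by rw [hvw]; omega⟩
      · intro y hy
        rw [mem_wfCand] at hy
        obtain ⟨hyl, hypos⟩ := hy
        rw [wfKey, wfKey, Prod.Lex.toLex_le_toLex]
        have hvy : v' y = wfVAt labs rf s u kn y := hIH y hyl
        have hvyle : v' y ≤ u := by
          rw [hvy]
          have := hvAt_le y
          have := min_le_right (s y) u
          omega
        rcases lt_or_eq_of_le hvyle with hlt | heq
        · left
          simp only []
          rw [hvw]
          omega
        · right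
          constructor
          · simp only []; rw [hvw, heq]
        -- y is an eligible label not yet served: it sits in the drop part of E
          · obtain ⟨hyE, hynt⟩ := hvAt_eq_u y hyl (by rw [← hvy, heq])
            have hyd : y ∈ E.drop kn := by
              rcases List.mem_append.mp ((List.take_append_drop kn E) ▸ hyE) with h | h
              · exact absurd h hynt
              · exact h
            have hdropeq : E.drop kn = w :: E.drop (kn + 1) := List.drop_eq_getElem_cons hklt
            have hpw : (E.drop kn).Pairwise (fun a b => wfPrio rf a ≤ wfPrio rf b) :=
              (wfElig_pairwise labs rf s u).sublist (List.drop_sublist _ _)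
            rw [hdropeq] at hpw hyd
            rcases List.mem_cons.mp hyd with rfl | hmem
            · exact le_rfl
            · exact (List.pairwise_cons.mp hpw).1 y hmem
    have hstep : ∀ x ∈ labs,
        wfIter labs rf s (n+1) x = wfVAt labs rf s u kn x - (if x = w then 1 else 0) := by
      intro x hx
      have hunf : wfIter labs rf s (n+1) x = wfStep labs rf v' x := rfl
      rw [hunf, wfStep, hchoose]
      simp only []
      rw [hIH x hx]
      split_ifs <;> ring
    have htake : E.take (kn + 1) = E.take kn ++ [w] := by
      rw [List.take_add_one, List.getElem?_eq_getElem hklt]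
      rfl
    have hA : ∀ x, wfVAt labs rf s u (kn + 1) x = wfVAt labs rf s u kn x - (if x = w then 1 else 0) := by
      intro x
      rw [wfVAt, wfVAt, htake]
      by_cases hxw : x = w
      · subst hxw
        rw [if_pos (List.mem_append.mpr (Or.inr (List.mem_singleton.mpr rfl))), if_neg hwnottake,
          if_pos rfl]
        ring
      · have : (x ∈ E.take kn ++ [w]) ↔ x ∈ E.take kn := by
          simp [List.mem_append, hxw]
        rw [if_neg hxw]
        by_cases hmem : x ∈ E.take kn
        · rw [if_pos (this.mpr hmem), if_pos hmem]; ring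
        · rw [if_neg (fun hc => hmem (this.mp hc)), if_neg hmem]; ring
    rcases lt_or_eq_of_le (Nat.succ_le_of_lt hklt) with hcase | hcase
    · -- same level, one more label served at it
      have hcanon' : wfCanon labs s ((n+1 : Nat) : Int) u := by
        refine ⟨hu0, by push_cast; omega, Or.inr ?_⟩
        push_cast
        omega
      have htu : t = u := wfCanon_unique labs s ((n+1 : Nat) : Int) t u ht hcanon'
      subst htu
      have hk' : (((n+1 : Nat) : Int) - wfAbove labs s t).toNat = kn + 1 := by
        push_cast
        omega
      rw [hk', hstep l hl, hA l]
    · -- the level is exhausted: all its labels served, drop to level u - 1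
      have habove' : wfAbove labs s (u - 1) = ((n+1 : Nat) : Int) := by
        push_cast
        omega
      have hcanon' : wfCanon labs s ((n+1 : Nat) : Int) (u - 1) := by
        refine ⟨by omega, le_of_eq habove', ?_⟩
        by_cases hu1'' : u - 1 = 0
        · exact Or.inl hu1''
        · refine Or.inr ?_
          have hpred := wfAbove_pred labs s (u - 1)
          have hmono : labs.countP (fun l => decide (u ≤ s l)) ≤
              labs.countP (fun l => decide (u - 1 ≤ s l)) := by
            apply List.countP_mono_left
            intro x _ hx
            simp only [decide_eq_true_eq] at hx ⊢
            omega
          have hcnt1 : 1 ≤ labs.countP (fun l => decide (u ≤ s l)) := by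
            have : ((labs.countP fun l => decide (u ≤ s l) : Nat) : Int) =
                wfAbove labs s (u - 1) - wfAbove labs s u := by
              rw [wfAbove_pred labs s u]; ring
            omega
          have : wfAbove labs s (u - 1 - 1) = wfAbove labs s (u - 1) +
              (labs.countP (fun l => decide (u - 1 ≤ s l)) : Int) := hpred
          push_cast
          omega
      have htu : t = u - 1 := wfCanon_unique labs s ((n+1 : Nat) : Int) t (u - 1) ht hcanon'
      subst htu
      have hk' : (((n+1 : Nat) : Int) - wfAbove labs s (u - 1)).toNat = 0 := by
        omega
      have hBB : wfVAt labs rf s u (kn + 1) l = wfVAt labs rf s (u - 1) 0 l := by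
        rw [wfVAt, wfVAt, List.take_zero, if_neg (List.not_mem_nil), ← hE_def]
        by_cases hxE : l ∈ E
        · have hfull : E.take (kn + 1) = E := List.take_of_length_le (by omega)
          rw [if_pos (show l ∈ E.take (kn + 1) by rw [hfull]; exact hxE)]
          have hls : u ≤ s l := ((mem_wfElig labs rf s u l).mp hxE).2
          rw [min_eq_right hls, min_eq_right (by omega)]
          ring
        · have hnt : l ∉ E.take (kn + 1) := fun hc => hxE (List.mem_of_mem_take hc)
          rw [if_neg hnt]
          have hsl : s l < u := by
            by_contra hcon
            exact hxE ((mem_wfElig labs rf s u l).mpr ⟨hl, by omega⟩)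
          rw [min_eq_left (by omega), min_eq_left (by omega)]
      rw [hk', hstep l hl, ← hA l, hBB]

-- a Python sort with a pair key is a sort with the corresponding lexicographic key
theorem sorted2_eq_sorted_toLex {α κ₁ κ₂ : Type} [LinearOrder κ₁] [LinearOrder κ₂]
    (xs : List α) (k1 : α → κ₁) (k2 : α → κ₂) :
    PySem.List.sorted2 xs k1 k2 false = PySem.List.sorted xs (fun x => toLex (k1 x, k2 x)) false := by
  have hbe : (fun a b => decide (k1 a < k1 b) || (!decide (k1 b < k1 a) && decide (k2 a < k2 b)))
      = (fun a b => decide ((fun x => toLex (k1 x, k2 x)) a < (fun x => toLex (k1 x, k2 x)) b)) := by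
    funext a b
    simp only [Prod.Lex.toLex_lt_toLex]
    rcases lt_trichotomy (k1 a) (k1 b) with h | h | h
    · simp [h, asymm h]
    · simp [h]
    · simp [h, asymm h, ne_of_gt h]
  rw [PySem.List.sorted_eq_foldl_insertBy]
  show xs.foldl (fun acc x => PySem.List.insertBy
    (fun a b => decide (k1 a < k1 b) || (!decide (k1 b < k1 a) && decide (k2 a < k2 b))) x acc) [] = _
  rw [hbe]

-- bridge: A's loop tracked through slack values
theorem rtLoopA_bridge (aD rD : PySem.Dict String Int) (hn : aD.keys.Nodup) :
    ∀ (n : Nat) (out : PySem.Dict String Int), out.keys = aD.keys →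
      (rtLoopA aD rD out n).keys = aD.keys ∧
      ∀ l : String, (rtLoopA aD rD out n).getD l 0 =
        aD.getD l 0 - wfIter aD.keys (fun l => rD.getD l 0)
          (fun l => aD.getD l 0 - out.getD l 0) n l := by
  intro n
  induction n with
  | zero =>
    intro out hkeys
    refine ⟨hkeys, fun l => ?_⟩
    show out.getD l 0 = aD.getD l 0 - (aD.getD l 0 - out.getD l 0)
    ring
  | succ n ih =>
    intro out hkeys
    set rf : String → Int := fun l => rD.getD l 0 with hrf_def
    set v : String → Int := fun l => aD.getD l 0 - out.getD l 0 with hv_def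
    have hcand : (PySem.List.sorted aD.keys (fun l => l) false).filter
        (fun l => decide (out.getD l 0 < aD.getD l 0)) = wfCand aD.keys v := by
      rw [wfCand]
      apply List.filter_congr
      intro x _
      apply decide_eq_decide.mpr
      show out.getD x 0 < aD.getD x 0 ↔ 0 < aD.getD x 0 - out.getD x 0
      omega
    have hkeyeq : (fun l => toLex (-(aD.getD l 0 - out.getD l 0), toLex (-(rD.getD l 0), l)))
        = wfKey v rf := rfl
    have hunf : rtLoopA aD rD out (n+1) =
        match PySem.List.sorted (wfCand aD.keys v) (wfKey v rf) false with
        | [] => out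
        | c :: _ => rtLoopA aD rD (out.modify c 0 (· + 1)) n := by
      show (match PySem.List.sorted2 ((PySem.List.sorted aD.keys (fun l => l) false).filter
          (fun l => decide (out.getD l 0 < aD.getD l 0)))
          (fun l => -(aD.getD l 0 - out.getD l 0)) (fun l => toLex (-(rD.getD l 0), l)) false with
        | [] => out
        | c :: _ => rtLoopA aD rD (out.modify c 0 (· + 1)) n) = _
      rw [sorted2_eq_sorted_toLex, hcand]
      rfl
    rcases hs : PySem.List.sorted (wfCand aD.keys v) (wfKey v rf) false with _ | ⟨c, rest⟩
    · rw [hunf, hs]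
      have hchoose : wfChoose aD.keys rf v = none := by
        rw [wfChoose, hs]
        rfl
      refine ⟨hkeys, fun l => ?_⟩
      rw [wfStep_none aD.keys rf v hchoose (n+1)]
      show out.getD l 0 = aD.getD l 0 - (aD.getD l 0 - out.getD l 0)
      ring
    · rw [hunf, hs]
      have hchoose : wfChoose aD.keys rf v = some c := by
        rw [wfChoose, hs]
        rfl
      have hcmem : c ∈ wfCand aD.keys v := by
        rw [← PySem.List.mem_sorted (wfCand aD.keys v) (wfKey v rf) false c, hs]
        exact List.mem_cons_self
      have hclabs : c ∈ aD.keys := ((mem_wfCand aD.keys v c).mp hcmem).1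
      have hccont : out.contains c = true := by
        rw [PySem.Dict.contains_iff_mem_keys, hkeys]
        exact hclabs
      have hkeys' : (out.modify c 0 (· + 1)).keys = aD.keys := by
        rw [PySem.Dict.keys_modify, PySem.Dict.keys_insert_of_contains out _ hccont]
        exact hkeys
      obtain ⟨ihk, ihg⟩ := ih (out.modify c 0 (· + 1)) hkeys'
      refine ⟨ihk, fun l => ?_⟩
      rw [ihg l]
      have hv' : (fun l => aD.getD l 0 - (out.modify c 0 (· + 1)).getD l 0) = wfStep aD.keys rf v := by
        funext x
        rw [wfStep, hchoose]
        simp only []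
        rw [PySem.Dict.getD_modify]
        split_ifs with hxc
        · subst hxc
          show aD.getD x 0 - (out.getD x 0 + 1) = aD.getD x 0 - out.getD x 0 - 1
          ring
        · rfl
      rw [hv', wfIter_shift]

-- bridge: binary search returns the canonical level
theorem rtBSearch_canon (vals : List Int) (need : Int) :
    ∀ (lo hi : Int), 0 ≤ lo → lo ≤ hi → rtAbove vals hi ≤ need →
      (lo = 0 ∨ need < rtAbove vals (lo - 1)) →
      0 ≤ rtBSearch vals need lo hi ∧
      rtAbove vals (rtBSearch vals need lo hi) ≤ need ∧
      (rtBSearch vals need lo hi = 0 ∨ need < rtAbove vals (rtBSearch vals need lo hi - 1)) := by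
  intro lo hi
  induction lo, hi using rtBSearch.induct vals need with
  | case1 lo hi h hle ih =>
    intro h0 hlh hhi hlo
    rw [rtBSearch, dif_pos h, if_pos hle]
    have h2 := (PySem.Int.le_floordiv_iff_mul_le (a := lo + hi) (b := 2) (q := lo) (by norm_num)).mpr (by omega)
    exact ih h0 h2 hle hlo
  | case2 lo hi h hle ih =>
    intro h0 hlh hhi hlo
    rw [rtBSearch, dif_pos h, if_neg hle]
    have h1 := (PySem.Int.floordiv_lt_iff_lt_mul (a := lo + hi) (b := 2) (q := hi) (by norm_num)).mpr (by omega)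
    have h2 := (PySem.Int.le_floordiv_iff_mul_le (a := lo + hi) (b := 2) (q := lo) (by norm_num)).mpr (by omega)
    refine ih (by omega) (by omega) hhi ?_
    right
    simpa using hle
  | case3 lo hi h =>
    intro h0 hlh hhi hlo
    rw [rtBSearch, dif_neg h]
    have : lo = hi := by omega
    subst this
    exact ⟨h0, hhi, hlo⟩

theorem rtAbove_eq_wfAbove (labs : List String) (s : String → Int) (t : Int) :
    rtAbove (labs.map s) t = wfAbove labs s t := by
  induction labs with
  | nil => rfl
  | cons l ls ih =>
    rw [rtAbove, wfAbove] at *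
    simp only [List.map_cons, List.filter_cons, List.sum_cons]
    by_cases hlt : t < s l
    · rw [if_pos (by simpa using hlt)]
      simp only [List.map_cons, List.sum_cons]
      rw [max_eq_left (by omega)]
      omega
    · rw [if_neg (by simpa using hlt)]
      rw [max_eq_right (by omega)]
      omega

theorem sum_map_sub_int {α : Type} (xs : List α) (f g : α → Int) :
    (xs.map (fun x => f x - g x)).sum = (xs.map f).sum - (xs.map g).sum := by
  induction xs with
  | nil => simp
  | cons a t ih =>
    simp only [List.map_cons, List.sum_cons, ih]
    ring

theorem fresh_items (labs : List String) (hn : labs.Nodup) (f : String → Int) :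
    (labs.foldl (fun d l => d.insert l (f l)) (PySem.Dict.empty : PySem.Dict String Int)).items
      = labs.map (fun l => (l, f l)) := by
  rw [PySem.Dict.items_foldl_insert_fresh labs (fun a => a) f PySem.Dict.empty
    (fun a _ => PySem.Dict.contains_empty a) (by simpa using hn)]
  rfl

theorem fresh_keys (labs : List String) (hn : labs.Nodup) (f : String → Int) :
    (labs.foldl (fun d l => d.insert l (f l)) (PySem.Dict.empty : PySem.Dict String Int)).keys
      = labs := by
  show ((labs.foldl (fun d l => d.insert l (f l)) (PySem.Dict.empty : PySem.Dict String Int)).items.map (·.1)) = labs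
  rw [fresh_items labs hn f, List.map_map]
  rw [show ((·.1) ∘ fun l : String => (l, f l)) = id from rfl, List.map_id]

theorem fresh_values (labs : List String) (hn : labs.Nodup) (f : String → Int) :
    (labs.foldl (fun d l => d.insert l (f l)) (PySem.Dict.empty : PySem.Dict String Int)).values
      = labs.map f := by
  show ((labs.foldl (fun d l => d.insert l (f l)) (PySem.Dict.empty : PySem.Dict String Int)).items.map (·.2)) = labs.map f
  rw [fresh_items labs hn f, List.map_map]
  rfl

theorem fresh_getD (labs : List String) (hn : labs.Nodup) (f : String → Int) {l : String}
    (hl : l ∈ labs) :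
    (labs.foldl (fun d l => d.insert l (f l)) (PySem.Dict.empty : PySem.Dict String Int)).getD l 0
      = f l := by
  apply PySem.Dict.getD_of_mem_items
  · rw [fresh_items labs hn f]
    exact List.mem_map.mpr ⟨l, hl, rfl⟩
  · rw [fresh_keys labs hn f]
    exact hn

theorem keys_modify_fold (d : PySem.Dict String Int) (xs : List String)
    (h : ∀ x ∈ xs, x ∈ d.keys) :
    (xs.foldl (fun d x => d.modify x 0 (· + 1)) d).keys = d.keys := by
  rw [PySem.Dict.keys_foldl_modify xs 0 (fun _ _ => (· + 1)) d,
    PySem.Set.update_eq_append_filter]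
  have hnil : List.filter (fun y => !PySem.Set.contains d.keys y) (PySem.Set.ofList xs) = [] := by
    rw [List.filter_eq_nil_iff]
    intro a ha
    have hmem : a ∈ xs := (PySem.Set.mem_ofList (xs := xs) (y := a)).mp ha
    simp
    exact h a hmem
  rw [hnil]
  simp

-- ===== VERDICT (by name: the statement is the Claim_ definition above) =====
theorem rebalance_targets_spec : Claim_equal_rebalance_targets := by
  intro targets available reference desired_total _ hpre
  rw [Spec_rebalance_targets, rebalance_targets, rebalance_targets_alt]
  set tD := PySem.Dict.ofList targets with htD_def
  set aD := PySem.Dict.ofList available with haD_def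
  set rD := PySem.Dict.ofList reference with hrD_def
  have hn : aD.keys.Nodup := PySem.Dict.nodup_keys_ofList available
  set out0 := aD.keys.foldl (fun d l => d.insert l (min (tD.getD l 0) (aD.getD l 0)))
    (PySem.Dict.empty : PySem.Dict String Int) with hout0_def
  set slackD := aD.keys.foldl (fun d l => d.insert l (aD.getD l 0 - out0.getD l 0))
    (PySem.Dict.empty : PySem.Dict String Int) with hslackD_def
  set need := desired_total - out0.values.sum with hneed_def
  -- basic facts about the two fresh dicts
  have hget0 : ∀ l ∈ aD.keys, out0.getD l 0 = min (tD.getD l 0) (aD.getD l 0) := by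
    intro l hl
    rw [hout0_def]
    exact fresh_getD aD.keys hn (fun l => min (tD.getD l 0) (aD.getD l 0)) hl
  have hs : ∀ l ∈ aD.keys, 0 ≤ (fun l => aD.getD l 0 - out0.getD l 0) l := by
    intro l hl
    simp only []
    rw [hget0 l hl]
    have := min_le_right (tD.getD l 0) (aD.getD l 0)
    omega
  have hval0 : out0.values = aD.keys.map (fun l => min (tD.getD l 0) (aD.getD l 0)) := by
    rw [hout0_def]
    exact fresh_values aD.keys hn _
  -- the precondition, read through the key list
  rw [Pre_rebalance_targets] at hpre
  rw [← haD_def, ← htD_def, PySem.Dict.items_eq_map_keys aD hn 0, List.map_map, List.map_map] at hpre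
  simp only [Function.comp_def] at hpre
  obtain ⟨hpre1, hpre2⟩ := hpre
  have hneed0 : 0 ≤ need := by
    rw [hneed_def, hval0]
    omega
  have habove0 : wfAbove aD.keys (fun l => aD.getD l 0 - out0.getD l 0) 0 =
      (aD.keys.map (fun k => aD.getD k 0)).sum - out0.values.sum := by
    rw [wfAbove]
    rw [List.map_congr_left (g := fun l => aD.getD l 0 - out0.getD l 0)
      (fun l hl => by simp only []; rw [max_eq_left (by have := hs l hl; simp only [] at this; omega)]; ring)]
    rw [sum_map_sub_int aD.keys (fun l => aD.getD l 0) (fun l => out0.getD l 0)]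
    rw [List.map_congr_left (g := fun l => min (tD.getD l 0) (aD.getD l 0)) hget0, ← hval0]
  have hneedle : need ≤ wfAbove aD.keys (fun l => aD.getD l 0 - out0.getD l 0) 0 := by
    rw [habove0, hneed_def]
    omega
  -- A's loop through the abstract greedy iteration
  obtain ⟨hkeysA, hgetA⟩ := rtLoopA_bridge aD rD hn need.toNat out0
    (by rw [hout0_def]; exact fresh_keys aD.keys hn _)
  -- B's slack values and binary search
  have hvalS : slackD.values = aD.keys.map (fun l => aD.getD l 0 - out0.getD l 0) := by
    rw [hslackD_def]
    exact fresh_values aD.keys hn _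
  rw [hvalS]
  set M := PySem.List.maxD (aD.keys.map (fun l => aD.getD l 0 - out0.getD l 0)) (fun s => s) 0 with hM_def
  have hMbound : 0 ≤ M ∧ ∀ y ∈ aD.keys.map (fun l => aD.getD l 0 - out0.getD l 0), y ≤ M := by
    rw [hM_def, PySem.List.maxD]
    cases hmax : PySem.List.max? (aD.keys.map (fun l => aD.getD l 0 - out0.getD l 0)) (fun s => s) with
    | none =>
      have hnil : aD.keys.map (fun l => aD.getD l 0 - out0.getD l 0) = [] := (PySem.List.max?_eq_none_iff _ _).mp hmax
      rw [hnil]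
      simp
    | some m =>
      have hmem := PySem.List.max?_mem hmax
      obtain ⟨l, hl, rfl⟩ := List.mem_map.mp hmem
      refine ⟨by simpa using hs l hl, ?_⟩
      intro y hy
      simpa using PySem.List.max?_isMax hmax y hy
  have habove_hi : rtAbove (aD.keys.map (fun l => aD.getD l 0 - out0.getD l 0)) M ≤ need := by
    rw [rtAbove_eq_wfAbove]
    have hz : wfAbove aD.keys (fun l => aD.getD l 0 - out0.getD l 0) M = 0 := by
      apply List.sum_eq_zero
      intro x hx
      obtain ⟨l, hl, rfl⟩ := List.mem_map.mp hx
      have := hMbound.2 ((fun l => aD.getD l 0 - out0.getD l 0) l) (List.mem_map.mpr ⟨l, hl, rfl⟩)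
      exact max_eq_right (by omega)
    omega
  have hcanonRT := rtBSearch_canon (aD.keys.map (fun l => aD.getD l 0 - out0.getD l 0)) need 0 M le_rfl hMbound.1 habove_hi (Or.inl rfl)
  set level := rtBSearch (aD.keys.map (fun l => aD.getD l 0 - out0.getD l 0)) need 0 M with hlevel_def
  have hcanon : wfCanon aD.keys (fun l => aD.getD l 0 - out0.getD l 0) need level := by
    obtain ⟨h1, h2, h3⟩ := hcanonRT
    rw [rtAbove_eq_wfAbove] at h2 h3
    exact ⟨h1, h2, h3⟩
  set extra := need - rtAbove (aD.keys.map (fun l => aD.getD l 0 - out0.getD l 0)) level with hextra_def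
  have hextraI : extra = need - wfAbove aD.keys (fun l => aD.getD l 0 - out0.getD l 0) level := by
    rw [hextra_def, rtAbove_eq_wfAbove]
  have hextra0 : 0 ≤ extra := by
    rw [hextraI]
    have := hcanon.2.1
    omega
  set outB0 := aD.keys.foldl (fun d l => d.insert l (aD.getD l 0 - min (slackD.getD l 0) level))
    (PySem.Dict.empty : PySem.Dict String Int) with houtB0_def
  have hgetS : ∀ l ∈ aD.keys, slackD.getD l 0 = (fun l => aD.getD l 0 - out0.getD l 0) l := by
    intro l hl
    rw [hslackD_def]
    exact fresh_getD aD.keys hn (fun l => aD.getD l 0 - out0.getD l 0) hl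
  have hgetB0 : ∀ l ∈ aD.keys, outB0.getD l 0 = aD.getD l 0 - min ((fun l => aD.getD l 0 - out0.getD l 0) l) level := by
    intro l hl
    rw [houtB0_def, fresh_getD aD.keys hn (fun l => aD.getD l 0 - min (slackD.getD l 0) level) hl]
    simp only []
    rw [hgetS l hl]
  -- the eligible list is wfElig
  have helig : aD.keys.filter (fun l => decide (level ≤ slackD.getD l 0))
      = aD.keys.filter (fun l => decide (level ≤ (fun l => aD.getD l 0 - out0.getD l 0) l)) :=
    List.filter_congr (fun x hx => by rw [hgetS x hx])
  rw [helig]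
  have heligeq : PySem.List.sorted (aD.keys.filter (fun l => decide (level ≤ (fun l => aD.getD l 0 - out0.getD l 0) l)))
      (fun l => toLex (-(rD.getD l 0), l)) false = wfElig aD.keys (fun l => rD.getD l 0) (fun l => aD.getD l 0 - out0.getD l 0) level := rfl
  rw [heligeq]
  rw [PySem.List.slice_to (xs := wfElig aD.keys (fun l => rD.getD l 0) (fun l => aD.getD l 0 - out0.getD l 0) level) (b := extra) hextra0]
  set outB := (if extra = 0 then outB0 else
      ((wfElig aD.keys (fun l => rD.getD l 0) (fun l => aD.getD l 0 - out0.getD l 0) level).take extra.toNat).foldl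
        (fun d l => d.modify l 0 (· + 1)) outB0) with houtB_def
  have htknodup : ((wfElig aD.keys (fun l => rD.getD l 0) (fun l => aD.getD l 0 - out0.getD l 0) level).take extra.toNat).Nodup :=
    (List.take_sublist _ _).nodup (wfElig_nodup aD.keys (fun l => rD.getD l 0) (fun l => aD.getD l 0 - out0.getD l 0) level hn)
  have hkeysB : outB.keys = aD.keys := by
    rw [houtB_def]
    split_ifs with hx0
    · rw [houtB0_def]; exact fresh_keys aD.keys hn _
    · rw [keys_modify_fold]
      · rw [houtB0_def]; exact fresh_keys aD.keys hn _
      · intro x hx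
        have hxe : x ∈ wfElig aD.keys (fun l => rD.getD l 0) (fun l => aD.getD l 0 - out0.getD l 0) level := List.mem_of_mem_take hx
        have : x ∈ aD.keys := ((mem_wfElig aD.keys (fun l => rD.getD l 0) (fun l => aD.getD l 0 - out0.getD l 0) level x).mp hxe).1
        rw [houtB0_def, fresh_keys aD.keys hn _]
        exact this
  have hgetB : ∀ l ∈ aD.keys, outB.getD l 0 =
      aD.getD l 0 - wfVAt aD.keys (fun l => rD.getD l 0) (fun l => aD.getD l 0 - out0.getD l 0) level extra.toNat l := by
    intro l hl
    rw [houtB_def]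
    split_ifs with hx0
    · rw [hgetB0 l hl, wfVAt]
      have : extra.toNat = 0 := by omega
      rw [this, List.take_zero, if_neg (List.not_mem_nil)]
      ring
    · rw [PySem.Dict.getD_foldl_modify_add_one, hgetB0 l hl, wfVAt]
      by_cases hmem : l ∈ (wfElig aD.keys (fun l => rD.getD l 0) (fun l => aD.getD l 0 - out0.getD l 0) level).take extra.toNat
      · rw [List.count_eq_one_of_mem htknodup hmem, if_pos hmem]
        push_cast
        ring
      · rw [List.count_eq_zero_of_not_mem hmem, if_neg hmem]
        push_cast
        ring
  -- the main theorem connects the two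
  have hcast : ((need.toNat : Nat) : Int) = need := Int.toNat_of_nonneg hneed0
  have hmain := wfIter_eq_vAt aD.keys (fun l => rD.getD l 0) (fun l => aD.getD l 0 - out0.getD l 0) hn hs need.toNat level
    (by rw [hcast]; exact hcanon) (by rw [hcast]; exact hneedle)
  have hkk : (((need.toNat : Nat) : Int) - wfAbove aD.keys (fun l => aD.getD l 0 - out0.getD l 0) level).toNat = extra.toNat := by
    rw [hcast, ← hextraI]
  -- both result dicts have the same items
  have hitemsA : (rtLoopA aD rD out0 need.toNat).items =
      aD.keys.map (fun l => (l, aD.getD l 0 - wfVAt aD.keys (fun l => rD.getD l 0) (fun l => aD.getD l 0 - out0.getD l 0) level extra.toNat l)) := by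
    rw [PySem.Dict.items_eq_map_keys _ (by rw [hkeysA]; exact hn) 0, hkeysA]
    apply List.map_congr_left
    intro l hl
    rw [hgetA l, hmain l hl, hkk]
  have hitemsB : outB.items =
      aD.keys.map (fun l => (l, aD.getD l 0 - wfVAt aD.keys (fun l => rD.getD l 0) (fun l => aD.getD l 0 - out0.getD l 0) level extra.toNat l)) := by
    rw [PySem.Dict.items_eq_map_keys _ (by rw [hkeysB]; exact hn) 0, hkeysB]
    apply List.map_congr_left
    intro l hl
    rw [hgetB l hl]
  rw [hitemsA, hitemsB]
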